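-- pv_equiv track=rewrite | github.com/DanielendaEst/tei-viewer | page2tei.py | slice_text_nodes
-- ===== SOURCE A (Python) =====
-- from typing import Any, Dict, List, Optional
--
-- def slice_text_nodes(text: str, ranges: List[tuple]) -> List[tuple]:
--     """
--     Slice text into segments based on annotation ranges.
--     ranges: list of (start, end, label)
--     returns list of (start, end, segment_text, labels_set)
--     """
--     cut_points = {0, len(text)}
--     for s, e, _ in ranges:
--         cut_points.add(max(0, min(len(text), s)))
--         cut_points.add(max(0, min(len(text), e)))
--
--     cuts = sorted(cut_points)
--     segments = []
--
--     for i in range(len(cuts) - 1):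
--         s, e = cuts[i], cuts[i + 1]
--         if s == e:
--             continue
--         segment = text[s:e]
--         labels = {lab for ss, ee, lab in ranges if ss <= s and e <= ee and ss < ee}
--         segments.append((s, e, segment, labels))
--
--     return segments
-- ===== SOURCE B (Python) =====
-- from bisect import bisect_left
-- from typing import List
--
--
-- def slice_text_nodes(text: str, ranges: List[tuple]) -> List[tuple]:
--     """
--     Slice text into segments based on annotation ranges.
--     Inverted strategy: instead of scanning all ranges for every segment,
--     locate each range's covered segment span once by binary search and
--     stamp its label onto those segments.
--     """
--     n = len(text)
--     pts = {0, n}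
--     for s, e, _ in ranges:
--         pts.add(max(0, min(n, s)))
--         pts.add(max(0, min(n, e)))
--     cuts = sorted(pts)
--     labels = [set() for _ in range(len(cuts) - 1)]
--     for ss, ee, lab in ranges:
--         if ss < ee:
--             i = bisect_left(cuts, max(0, min(n, ss)))
--             j = bisect_left(cuts, max(0, min(n, ee)))
--             for k in range(i, j):
--                 labels[k].add(lab)
--     return [(cuts[k], cuts[k + 1], text[cuts[k]:cuts[k + 1]], labels[k])
--             for k in range(len(cuts) - 1)]
-- ===== Notes on version B (the rewrite author's own statement) =====
-- stated objective: alternative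
-- what changed: Instead of scanning the whole range list once per segment to collect covering labels, B binary-searches each range's covered segment span in the sorted cut list once and stamps its label onto exactly those segments.
import Mathlib
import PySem

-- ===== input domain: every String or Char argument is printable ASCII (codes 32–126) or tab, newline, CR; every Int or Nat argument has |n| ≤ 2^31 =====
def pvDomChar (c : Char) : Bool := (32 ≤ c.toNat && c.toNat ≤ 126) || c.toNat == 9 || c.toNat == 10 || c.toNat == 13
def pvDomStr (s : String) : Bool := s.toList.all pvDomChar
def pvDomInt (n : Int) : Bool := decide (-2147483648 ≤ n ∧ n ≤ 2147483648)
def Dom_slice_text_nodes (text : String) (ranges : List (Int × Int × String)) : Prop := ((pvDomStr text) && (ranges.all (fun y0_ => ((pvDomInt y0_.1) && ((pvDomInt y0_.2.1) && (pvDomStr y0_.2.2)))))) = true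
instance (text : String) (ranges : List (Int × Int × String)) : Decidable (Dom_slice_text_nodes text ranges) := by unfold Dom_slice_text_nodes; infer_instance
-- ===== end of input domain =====

-- B replaces A's per-segment scan over the whole range list by one binary search per range
-- that stamps its label onto exactly the segments it covers (objective: alternative algorithm).

-- ===== PORT A =====
-- max(0, min(len(text), v)) — the clamp both Pythons apply to each range endpoint
def stn_clamp (n v : Int) : Int := max 0 (min n v)

-- the cut-point computation shared verbatim by both Pythons:
-- cut_points = {0, len(text)}; add both clamped endpoints of every range; cuts = sorted(cut_points)
def stn_cuts (text : String) (ranges : List (Int × Int × String)) : List Int :=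
  PySem.List.sorted
    (ranges.foldl
      (fun st r =>
        PySem.Set.add (PySem.Set.add st (stn_clamp (PySem.Str.len text) r.1))
          (stn_clamp (PySem.Str.len text) r.2.1))
      (PySem.Set.ofList [0, PySem.Str.len text]))
    (fun x => x) false

def slice_text_nodes (text : String) (ranges : List (Int × Int × String)) : List (Int × Int × String × List String) :=
  let cuts := stn_cuts text ranges
  -- for i in range(len(cuts)-1): skip s==e; labels = {lab for ss,ee,lab in ranges if ss<=s and e<=ee and ss<ee}
  (PySem.List.pyRange 0 ((cuts.length : Int) - 1) 1).foldl
    (fun segments i =>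
      let s := PySem.List.pyGetD cuts i 0
      let e := PySem.List.pyGetD cuts (i + 1) 0
      if s = e then segments
      else
        segments ++ [(s, e, PySem.Str.slice text (some s) (some e),
          PySem.Set.ofList
            ((ranges.filter
                (fun r => decide (r.1 ≤ s) && decide (e ≤ r.2.1) && decide (r.1 < r.2.1))).map
              (fun r => r.2.2)))])
    []

-- ===== PORT B =====
def slice_text_nodes_alt (text : String) (ranges : List (Int × Int × String)) : List (Int × Int × String × List String) :=
  let n := PySem.Str.len text
  let cuts := stn_cuts text ranges
  -- labels = [set() for _ in range(len(cuts)-1)]  (len(cuts) ≥ 1 always: 0 is a cut point)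
  let labels0 : List (PySem.Set String) := List.replicate (cuts.length - 1) PySem.Set.empty
  -- for ss,ee,lab in ranges: if ss<ee: i,j = bisect_left at clamped endpoints; for k in range(i,j): labels[k].add(lab)
  let labels := ranges.foldl
    (fun arr r =>
      if r.1 < r.2.1 then
        let i := PySem.List.bisectLeft cuts (stn_clamp n r.1)
        let j := PySem.List.bisectLeft cuts (stn_clamp n r.2.1)
        (PySem.List.pyRange (i : Int) (j : Int) 1).foldl
          (fun a k => PySem.List.pySetD a k (PySem.Set.add (PySem.List.pyGetD a k PySem.Set.empty) r.2.2))
          arr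
      else arr)
    labels0
  -- [(cuts[k], cuts[k+1], text[cuts[k]:cuts[k+1]], labels[k]) for k in range(len(cuts)-1)]
  (PySem.List.pyRange 0 ((cuts.length : Int) - 1) 1).map
    (fun k =>
      (PySem.List.pyGetD cuts k 0, PySem.List.pyGetD cuts (k + 1) 0,
        PySem.Str.slice text (some (PySem.List.pyGetD cuts k 0)) (some (PySem.List.pyGetD cuts (k + 1) 0)),
        PySem.List.pyGetD labels k PySem.Set.empty))

-- ===== PRECONDITION & SPEC =====
def Spec_slice_text_nodes (text : String) (ranges : List (Int × Int × String)) (out : List (Int × Int × String × List String)) : Prop := out = slice_text_nodes_alt text ranges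
instance (text : String) (ranges : List (Int × Int × String)) (out : List (Int × Int × String × List String)) : Decidable (Spec_slice_text_nodes text ranges out) := by unfold Spec_slice_text_nodes; infer_instance

-- ===== CLAIM (what is proved, stated in full; the proofs are below) =====
def Claim_equal_slice_text_nodes : Prop := ∀ (text : String) (ranges : List (Int × Int × String)), Dom_slice_text_nodes text ranges → Spec_slice_text_nodes text ranges (slice_text_nodes text ranges)

-- ===== LEMMAS AND PROOFS =====

-- the cut values in the order both Pythons insert them
def stn_cutList (text : String) (ranges : List (Int × Int × String)) : List Int :=
  0 :: PySem.Str.len text ::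
    ranges.flatMap (fun r => [stn_clamp (PySem.Str.len text) r.1, stn_clamp (PySem.Str.len text) r.2.1])

lemma stn_foldl_add2 (n : Int) (rs : List (Int × Int × String)) (init : PySem.Set Int) :
    rs.foldl (fun st r => PySem.Set.add (PySem.Set.add st (stn_clamp n r.1)) (stn_clamp n r.2.1)) init
      = (rs.flatMap (fun r => [stn_clamp n r.1, stn_clamp n r.2.1])).foldl PySem.Set.add init := by
  induction rs generalizing init with
  | nil => rfl
  | cons r rs ih => simp [List.flatMap_cons, ih]

lemma stn_cuts_eq (text : String) (ranges : List (Int × Int × String)) :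
    stn_cuts text ranges
      = PySem.List.sorted (PySem.Set.ofList (stn_cutList text ranges)) (fun x => x) false := by
  unfold stn_cuts stn_cutList
  rw [stn_foldl_add2, PySem.Set.ofList_eq_foldl]
  rfl

lemma stn_cuts_sorted (text : String) (ranges : List (Int × Int × String)) :
    (stn_cuts text ranges).Pairwise (· < ·) := by
  rw [stn_cuts_eq]; exact PySem.List.sorted_ofList_pairwise_lt _

lemma stn_mem_cuts (text : String) (ranges : List (Int × Int × String)) (x : Int) :
    x ∈ stn_cuts text ranges ↔ x ∈ stn_cutList text ranges := by
  rw [stn_cuts_eq, PySem.List.mem_sorted]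
  exact PySem.Set.mem_ofList _ _

lemma stn_len_nonneg (text : String) : 0 ≤ PySem.Str.len text := by
  rw [PySem.Str.len_eq]; positivity

lemma stn_cuts_bound (text : String) (ranges : List (Int × Int × String)) (x : Int)
    (hx : x ∈ stn_cuts text ranges) : 0 ≤ x ∧ x ≤ PySem.Str.len text := by
  have hn := stn_len_nonneg text
  rw [stn_mem_cuts] at hx
  unfold stn_cutList at hx
  simp only [List.mem_cons, List.mem_flatMap] at hx
  rcases hx with rfl | rfl | ⟨r, _, hx⟩
  · omega
  · omega
  · simp only [List.not_mem_nil, or_false] at hx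
    rcases hx with rfl | rfl <;> unfold stn_clamp <;> omega

lemma stn_zero_mem_cuts (text : String) (ranges : List (Int × Int × String)) :
    0 ∈ stn_cuts text ranges := by
  rw [stn_mem_cuts]; unfold stn_cutList; simp

lemma stn_cuts_len_pos (text : String) (ranges : List (Int × Int × String)) :
    0 < (stn_cuts text ranges).length :=
  List.length_pos_of_mem (stn_zero_mem_cuts text ranges)

lemma stn_clamp_mem_cuts (text : String) (ranges : List (Int × Int × String))
    (r : Int × Int × String) (hr : r ∈ ranges) :
    stn_clamp (PySem.Str.len text) r.1 ∈ stn_cuts text ranges ∧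
      stn_clamp (PySem.Str.len text) r.2.1 ∈ stn_cuts text ranges := by
  rw [stn_mem_cuts, stn_mem_cuts]
  unfold stn_cutList
  constructor <;> simp only [List.mem_cons, List.mem_flatMap] <;> right <;> right <;>
    exact ⟨r, hr, by simp⟩

lemma stn_getElem_lt (text : String) (ranges : List (Int × Int × String)) (p q : Nat)
    (hq : q < (stn_cuts text ranges).length) (hpq : p < q) :
    (stn_cuts text ranges)[p]'(by omega) < (stn_cuts text ranges)[q] := by
  exact List.pairwise_iff_getElem.mp (stn_cuts_sorted text ranges) p q (by omega) hq hpq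

lemma stn_getElem_le_iff (text : String) (ranges : List (Int × Int × String)) (p q : Nat)
    (hp : p < (stn_cuts text ranges).length) (hq : q < (stn_cuts text ranges).length) :
    (stn_cuts text ranges)[p] ≤ (stn_cuts text ranges)[q] ↔ p ≤ q := by
  constructor
  · intro h
    by_contra hc
    exact absurd (stn_getElem_lt text ranges q p hp (by omega)) (by omega)
  · intro h
    rcases Nat.lt_or_ge p q with h' | h'
    · exact le_of_lt (stn_getElem_lt text ranges p q hq h')
    · have : p = q := by omega
      subst this; exact le_refl _

lemma stn_bisect_le_iff (text : String) (ranges : List (Int × Int × String)) (x : Int) (k : Nat)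
    (hk : k < (stn_cuts text ranges).length) :
    PySem.List.bisectLeft (stn_cuts text ranges) x ≤ k ↔ x ≤ (stn_cuts text ranges)[k] := by
  obtain ⟨h1, h2, h3⟩ := PySem.List.bisectLeft_spec (stn_cuts text ranges) x
    ((stn_cuts_sorted text ranges).imp le_of_lt)
  constructor
  · intro h
    exact h3 k hk h
  · intro h
    by_contra hc
    exact absurd (h2 k hk (by omega)) (by omega)

lemma stn_bisect_mem (text : String) (ranges : List (Int × Int × String)) (x : Int)
    (hx : x ∈ stn_cuts text ranges) :
    ∃ h : PySem.List.bisectLeft (stn_cuts text ranges) x < (stn_cuts text ranges).length,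
      (stn_cuts text ranges)[PySem.List.bisectLeft (stn_cuts text ranges) x] = x := by
  obtain ⟨h1, h2, h3⟩ := PySem.List.bisectLeft_spec (stn_cuts text ranges) x
    ((stn_cuts_sorted text ranges).imp le_of_lt)
  obtain ⟨q, hq, hqx⟩ := List.mem_iff_getElem.mp hx
  have htq : PySem.List.bisectLeft (stn_cuts text ranges) x ≤ q := by
    by_contra hc
    exact absurd (h2 q hq (by omega)) (by omega)
  have ht : PySem.List.bisectLeft (stn_cuts text ranges) x < (stn_cuts text ranges).length := by omega
  have hle := h3 _ ht (le_refl _)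
  have hle2 : (stn_cuts text ranges)[PySem.List.bisectLeft (stn_cuts text ranges) x] ≤
      (stn_cuts text ranges)[q] := (stn_getElem_le_iff text ranges _ q ht hq).mpr htq
  exact ⟨ht, by omega⟩

lemma stn_succ_le_bisect_iff (text : String) (ranges : List (Int × Int × String)) (x : Int)
    (hx : x ∈ stn_cuts text ranges) (k : Nat) (hk : k + 1 < (stn_cuts text ranges).length) :
    k + 1 ≤ PySem.List.bisectLeft (stn_cuts text ranges) x ↔ (stn_cuts text ranges)[k + 1] ≤ x := by
  obtain ⟨ht, heq⟩ := stn_bisect_mem text ranges x hx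
  conv_rhs => rw [← heq]
  exact (stn_getElem_le_iff text ranges (k + 1) _ hk ht).symm

lemma stn_getD_set {α : Type} (arr : List α) (i k : Nat) (v d : α) (hk : k < arr.length) :
    (arr.set i v).getD k d = if i = k then v else arr.getD k d := by
  rw [List.getD_eq_getElem _ _ (by simpa using hk), List.getElem_set]
  split_ifs
  · rfl
  · exact (List.getD_eq_getElem arr d hk).symm

lemma stn_inner_fold (lab : String) (d : Nat) :
    ∀ (i j : Nat) (arr : List (PySem.Set String)), j ≤ i + d →
      ((PySem.List.pyRange (i : Int) (j : Int) 1).foldl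
          (fun a k => PySem.List.pySetD a k (PySem.Set.add (PySem.List.pyGetD a k PySem.Set.empty) lab))
          arr).length = arr.length ∧
      ∀ k : Nat, k < arr.length →
        ((PySem.List.pyRange (i : Int) (j : Int) 1).foldl
            (fun a k => PySem.List.pySetD a k (PySem.Set.add (PySem.List.pyGetD a k PySem.Set.empty) lab))
            arr).getD k PySem.Set.empty =
          if i ≤ k ∧ k < j then (arr.getD k PySem.Set.empty).add lab else arr.getD k PySem.Set.empty := by
  induction d with
  | zero =>
    intro i j arr hj
    rw [PySem.List.pyRange_one_eq_nil (by exact_mod_cast hj)]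
    exact ⟨rfl, fun k hk => by rw [List.foldl_nil, if_neg (by omega)]⟩
  | succ d ih =>
    intro i j arr hj
    by_cases hij : i < j
    · rw [PySem.List.pyRange_one_cons (by exact_mod_cast hij)]
      simp only [List.foldl_cons]
      have hstep : PySem.List.pySetD arr (i : Int)
            (PySem.Set.add (PySem.List.pyGetD arr (i : Int) PySem.Set.empty) lab)
          = arr.set i (PySem.Set.add (arr.getD i PySem.Set.empty) lab) := by
        rw [PySem.List.pySetD_natCast, PySem.List.pyGetD_natCast]
      have hcast : (i : Int) + 1 = ((i + 1 : Nat) : Int) := by push_cast; ring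
      rw [hstep, hcast]
      obtain ⟨hl, hg⟩ := ih (i + 1) j (arr.set i (PySem.Set.add (arr.getD i PySem.Set.empty) lab))
        (by omega)
      refine ⟨by simpa using hl, fun k hk => ?_⟩
      rw [hg k (by simpa using hk), stn_getD_set _ i k _ _ hk]
      rcases eq_or_ne i k with rfl | hne
      · rw [if_neg (by omega), if_pos rfl, if_pos ⟨le_refl i, hij⟩]
      · rw [if_neg hne]
        by_cases h : i + 1 ≤ k ∧ k < j
        · rw [if_pos h, if_pos (by omega)]
        · rw [if_neg h, if_neg (by omega)]
    · rw [PySem.List.pyRange_one_eq_nil (by exact_mod_cast (by omega : j ≤ i))]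
      exact ⟨rfl, fun k hk => by rw [List.foldl_nil, if_neg (by omega)]⟩

lemma stn_ofList_append_singleton {x : String} (l : List String) :
    PySem.Set.ofList (l ++ [x]) = PySem.Set.add (PySem.Set.ofList l) x := by
  simp [PySem.Set.ofList_eq_foldl, List.foldl_append]

-- the bisect window of a range is exactly the set of segments it covers
lemma stn_window (text : String) (ranges : List (Int × Int × String))
    (r : Int × Int × String) (hr : r ∈ ranges) (k : Nat)
    (hk : k + 1 < (stn_cuts text ranges).length) :
    (PySem.List.bisectLeft (stn_cuts text ranges) (stn_clamp (PySem.Str.len text) r.1) ≤ k ∧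
        k < PySem.List.bisectLeft (stn_cuts text ranges) (stn_clamp (PySem.Str.len text) r.2.1))
      ↔ (r.1 ≤ (stn_cuts text ranges)[k]'(by omega) ∧ (stn_cuts text ranges)[k + 1] ≤ r.2.1) := by
  show (_ ≤ k ∧ k + 1 ≤ _) ↔ _
  have hk1 : k < (stn_cuts text ranges).length := by omega
  have hb1 := stn_cuts_bound text ranges _ (List.getElem_mem hk1)
  have hb2 := stn_cuts_bound text ranges _ (List.getElem_mem hk)
  have hlt := stn_getElem_lt text ranges k (k + 1) hk (by omega)
  obtain ⟨hm1, hm2⟩ := stn_clamp_mem_cuts text ranges r hr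
  rw [stn_bisect_le_iff text ranges _ k hk1, stn_succ_le_bisect_iff text ranges _ hm2 k hk]
  unfold stn_clamp
  constructor <;> (intro ⟨a, b⟩; constructor <;> omega)

lemma stn_main_fold (text : String) (ranges : List (Int × Int × String)) (rs : List (Int × Int × String))
    (hrs : ∀ r ∈ rs, r ∈ ranges) :
    ∀ (arr : List (PySem.Set String)), arr.length = (stn_cuts text ranges).length - 1 →
    ∀ (f : Nat → List String), (∀ k, k < arr.length → arr.getD k PySem.Set.empty = PySem.Set.ofList (f k)) →
      ((rs.foldl
          (fun arr r =>
            if r.1 < r.2.1 then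
              (PySem.List.pyRange
                  (PySem.List.bisectLeft (stn_cuts text ranges) (stn_clamp (PySem.Str.len text) r.1) : Int)
                  (PySem.List.bisectLeft (stn_cuts text ranges) (stn_clamp (PySem.Str.len text) r.2.1) : Int) 1).foldl
                (fun a k => PySem.List.pySetD a k (PySem.Set.add (PySem.List.pyGetD a k PySem.Set.empty) r.2.2))
                arr
            else arr)
          arr).length = arr.length ∧
        ∀ k : Nat, k < arr.length →
          (rs.foldl
            (fun arr r =>
              if r.1 < r.2.1 then
                (PySem.List.pyRange
                    (PySem.List.bisectLeft (stn_cuts text ranges) (stn_clamp (PySem.Str.len text) r.1) : Int)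
                    (PySem.List.bisectLeft (stn_cuts text ranges) (stn_clamp (PySem.Str.len text) r.2.1) : Int) 1).foldl
                  (fun a k => PySem.List.pySetD a k (PySem.Set.add (PySem.List.pyGetD a k PySem.Set.empty) r.2.2))
                  arr
              else arr)
            arr).getD k PySem.Set.empty =
            PySem.Set.ofList (f k ++
              (rs.filter
                  (fun r => decide (r.1 ≤ (stn_cuts text ranges).getD k 0) &&
                    decide ((stn_cuts text ranges).getD (k + 1) 0 ≤ r.2.1) && decide (r.1 < r.2.1))).map
                (fun r => r.2.2))) := by
  induction rs with
  | nil =>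
    intro arr hlen f hf
    exact ⟨rfl, fun k hk => by simpa using hf k hk⟩
  | cons r rs ih =>
    intro arr hlen f hf
    have hr : r ∈ ranges := hrs r (List.mem_cons_self)
    have hrs' : ∀ x ∈ rs, x ∈ ranges := fun x hx => hrs x (List.mem_cons_of_mem r hx)
    have hlenpos := stn_cuts_len_pos text ranges
    simp only [List.foldl_cons]
    by_cases hcond : r.1 < r.2.1
    · rw [if_pos hcond]
      obtain ⟨hl, hg⟩ := stn_inner_fold r.2.2
        (PySem.List.bisectLeft (stn_cuts text ranges) (stn_clamp (PySem.Str.len text) r.2.1))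
        (PySem.List.bisectLeft (stn_cuts text ranges) (stn_clamp (PySem.Str.len text) r.1))
        (PySem.List.bisectLeft (stn_cuts text ranges) (stn_clamp (PySem.Str.len text) r.2.1))
        arr (by omega)
      obtain ⟨hl2, hg2⟩ := ih hrs' _ (by rw [hl, hlen])
        (fun k => f k ++
          (([r].filter
              (fun r => decide (r.1 ≤ (stn_cuts text ranges).getD k 0) &&
                decide ((stn_cuts text ranges).getD (k + 1) 0 ≤ r.2.1) && decide (r.1 < r.2.1))).map
            (fun r => r.2.2)))
        (by
          intro k hk
          beta_reduce
          have hkarr : k < arr.length := by omega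
          have hk1 : k + 1 < (stn_cuts text ranges).length := by omega
          have hwin := stn_window text ranges r hr k hk1
          rw [hg k hkarr]
          rw [List.getD_eq_getElem (stn_cuts text ranges) 0 (by omega : k < _),
            List.getD_eq_getElem (stn_cuts text ranges) 0 hk1]
          by_cases hcov : r.1 ≤ (stn_cuts text ranges)[k] ∧ (stn_cuts text ranges)[k + 1] ≤ r.2.1
          · rw [if_pos (hwin.mpr hcov)]
            have : ([r].filter
                (fun r => decide (r.1 ≤ (stn_cuts text ranges)[k]) &&
                  decide ((stn_cuts text ranges)[k + 1] ≤ r.2.1) && decide (r.1 < r.2.1))) = [r] := by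
              simp [hcov.1, hcov.2, hcond]
            rw [this, List.map_cons, List.map_nil, hf k hkarr, stn_ofList_append_singleton]
          · rw [if_neg (fun h => hcov (hwin.mp h))]
            have : ([r].filter
                (fun r => decide (r.1 ≤ (stn_cuts text ranges)[k]) &&
                  decide ((stn_cuts text ranges)[k + 1] ≤ r.2.1) && decide (r.1 < r.2.1))) = [] := by
              simp only [List.filter_cons, List.filter_nil]
              rw [if_neg (by simpa [Bool.and_eq_true, decide_eq_true_eq, hcond] using hcov)]
            rw [this, List.map_nil, List.append_nil, hf k hkarr])
      refine ⟨by rw [hl2, hl], fun k hk => ?_⟩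
      rw [hg2 k (by omega)]
      congr 1
      rw [List.append_assoc, List.filter_cons]
      by_cases hp : (decide (r.1 ≤ (stn_cuts text ranges).getD k 0) &&
          decide ((stn_cuts text ranges).getD (k + 1) 0 ≤ r.2.1) && decide (r.1 < r.2.1)) = true
      · rw [if_pos hp]
        simp only [List.filter_cons, List.filter_nil, if_pos hp, List.map_cons, List.map_nil]
        rfl
      · rw [if_neg hp]
        simp only [List.filter_cons, List.filter_nil, if_neg hp, List.map_nil, List.nil_append]
    · rw [if_neg hcond]
      obtain ⟨hl2, hg2⟩ := ih hrs' arr hlen f hf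
      refine ⟨hl2, fun k hk => ?_⟩
      rw [hg2 k hk]
      congr 2
      rw [List.filter_cons, if_neg (by simp [hcond])]


-- A's per-segment tuple, with the let-bound s and e of A substituted in
def stn_gA (text : String) (ranges : List (Int × Int × String)) (i : Int) :
    Int × Int × String × List String :=
  (PySem.List.pyGetD (stn_cuts text ranges) i 0, PySem.List.pyGetD (stn_cuts text ranges) (i + 1) 0,
    PySem.Str.slice text (some (PySem.List.pyGetD (stn_cuts text ranges) i 0))
      (some (PySem.List.pyGetD (stn_cuts text ranges) (i + 1) 0)),
    PySem.Set.ofList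
      (List.map (fun r => r.2.2)
        (List.filter
          (fun r =>
            decide (r.1 ≤ PySem.List.pyGetD (stn_cuts text ranges) i 0) &&
              decide (PySem.List.pyGetD (stn_cuts text ranges) (i + 1) 0 ≤ r.2.1) &&
              decide (r.1 < r.2.1))
          ranges)))

-- ===== VERDICT (by name: the statement is the Claim_ definition above) =====
theorem slice_text_nodes_spec : Claim_equal_slice_text_nodes := by
  intro text ranges _h
  show slice_text_nodes text ranges = slice_text_nodes_alt text ranges
  have hlenpos := stn_cuts_len_pos text ranges
  obtain ⟨hl, hg⟩ := stn_main_fold text ranges ranges (fun r h => h)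
    (List.replicate ((stn_cuts text ranges).length - 1) PySem.Set.empty)
    (by rw [List.length_replicate])
    (fun _ => [])
    (by
      intro k hk
      rw [List.length_replicate] at hk
      rw [List.getD_replicate _ hk]
      rfl)
  rw [List.length_replicate] at hl hg
  unfold slice_text_nodes slice_text_nodes_alt
  dsimp only []
  have hA : (List.foldl
        (fun segments i =>
          if PySem.List.pyGetD (stn_cuts text ranges) i 0
              = PySem.List.pyGetD (stn_cuts text ranges) (i + 1) 0 then segments
          else segments ++ [stn_gA text ranges i])
        [] (PySem.List.pyRange 0 (((stn_cuts text ranges).length : Int) - 1)))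
      = (PySem.List.pyRange 0 (((stn_cuts text ranges).length : Int) - 1)).map (stn_gA text ranges) := by
    rw [PySem.List.foldl_congr_mem _ _ (fun segments i => segments ++ [stn_gA text ranges i]) []
      (by
        intro acc i hi
        obtain ⟨h0, h1⟩ := PySem.List.mem_pyRange_one.mp hi
        obtain ⟨k, rfl⟩ : ∃ k : Nat, (k : Int) = i := ⟨i.toNat, Int.toNat_of_nonneg h0⟩
        have hk1 : k + 1 < (stn_cuts text ranges).length := by omega
        beta_reduce
        rw [if_neg ?_]
        have hcast : ((k : Int) + 1) = ((k + 1 : Nat) : Int) := by push_cast; ring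
        rw [hcast, PySem.List.pyGetD_natCast, PySem.List.pyGetD_natCast,
          List.getD_eq_getElem _ _ (by omega : k < (stn_cuts text ranges).length),
          List.getD_eq_getElem _ _ hk1]
        exact ne_of_lt (stn_getElem_lt text ranges k (k + 1) hk1 (by omega)))]
    rw [PySem.List.foldl_append_singleton_eq_map, List.nil_append]
  rw [show (List.foldl
        (fun segments i =>
          if PySem.List.pyGetD (stn_cuts text ranges) i 0
              = PySem.List.pyGetD (stn_cuts text ranges) (i + 1) 0 then segments
          else
            segments ++
              [(PySem.List.pyGetD (stn_cuts text ranges) i 0,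
                  PySem.List.pyGetD (stn_cuts text ranges) (i + 1) 0,
                  PySem.Str.slice text (some (PySem.List.pyGetD (stn_cuts text ranges) i 0))
                    (some (PySem.List.pyGetD (stn_cuts text ranges) (i + 1) 0)),
                  PySem.Set.ofList
                    (List.map (fun r => r.2.2)
                      (List.filter
                        (fun r =>
                          decide (r.1 ≤ PySem.List.pyGetD (stn_cuts text ranges) i 0) &&
                            decide (PySem.List.pyGetD (stn_cuts text ranges) (i + 1) 0 ≤ r.2.1) &&
                            decide (r.1 < r.2.1))
                        ranges)))])
        [] (PySem.List.pyRange 0 (((stn_cuts text ranges).length : Int) - 1)))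
      = (List.foldl
        (fun segments i =>
          if PySem.List.pyGetD (stn_cuts text ranges) i 0
              = PySem.List.pyGetD (stn_cuts text ranges) (i + 1) 0 then segments
          else segments ++ [stn_gA text ranges i])
        [] (PySem.List.pyRange 0 (((stn_cuts text ranges).length : Int) - 1))) from rfl, hA]
  apply List.map_congr_left
  intro i hi
  obtain ⟨h0, h1⟩ := PySem.List.mem_pyRange_one.mp hi
  obtain ⟨k, rfl⟩ : ∃ k : Nat, (k : Int) = i := ⟨i.toNat, Int.toNat_of_nonneg h0⟩
  have hklt : k < (stn_cuts text ranges).length - 1 := by omega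
  unfold stn_gA
  have hcast : ((k : Int) + 1) = ((k + 1 : Nat) : Int) := by push_cast; ring
  rw [hcast, PySem.List.pyGetD_natCast (stn_cuts text ranges),
    PySem.List.pyGetD_natCast (stn_cuts text ranges), PySem.List.pyGetD_natCast]
  rw [hg k hklt, List.nil_append]
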